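-- pv_equiv track=rewrite | github.com/CptnSteve/prime_viz | prime_viz.py | gen_points
-- ===== SOURCE A (Python) =====
-- def move_right(x,y):
--   return x+1, y
--
-- def move_left(x,y):
--   return x-1, y
--
-- def move_up(x,y):
--   return x,y+1
--
-- def move_down(x,y):
--   return x,y-1
--
-- def gen_points(end):
--   from itertools import cycle
--   moves = [move_right, move_down, move_left, move_up]
--   _moves = cycle(moves)
--   n = 1
--   pos = 0,0
--   times_to_move = 1
--
--   yield prime_check(n), pos[0], pos[1], n
--
--   while True:
--     for _ in range(2):
--       move = next(_moves)
--       for _ in range(times_to_move):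
--         if n >= end:
--           return
--         pos = move(*pos)
--         n+=1
--         yield prime_check(n), pos[0], pos[1], n
--     times_to_move+=1
--
-- def prime_check(num):
--   prime_status = 1
--   if (num==1):
--     prime_status = 0
--   for i in range(2,num):
--     if (num % i == 0):
--       prime_status = 0
--       break
--   return prime_status
-- ===== SOURCE B (Python) =====
-- def gen_points(end):
--     # B: O(sqrt(n)) trial division (stop at i*i > n) + flat single-loop spiral walk
--     def is_prime(num):
--         if num < 2:
--             return 0
--         i = 2
--         while i * i <= num:
--             if num % i == 0:
--                 return 0
--             i += 1
--         return 1
--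
--     yield is_prime(1), 0, 0, 1
--     x = y = 0
--     n = 1
--     deltas = ((1, 0), (0, -1), (-1, 0), (0, 1))
--     leg = 0
--     while n < end:
--         dx, dy = deltas[leg % 4]
--         steps = leg // 2 + 1
--         if steps > end - n:
--             steps = end - n
--         for _ in range(steps):
--             x += dx
--             y += dy
--             n += 1
--             yield is_prime(n), x, y, n
--         leg += 1
-- ===== Notes on version B (the rewrite author's own statement) =====
-- stated objective: faster
-- what changed: Primality now uses trial division that stops once the candidate's square exceeds the number, instead of scanning every smaller candidate, and the spiral is emitted by one flat leg loop (direction = leg mod four, length = leg floordiv two plus one, truncated by the remaining count) instead of the itertools.cycle / nested pair-of-legs loop.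
import Mathlib
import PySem

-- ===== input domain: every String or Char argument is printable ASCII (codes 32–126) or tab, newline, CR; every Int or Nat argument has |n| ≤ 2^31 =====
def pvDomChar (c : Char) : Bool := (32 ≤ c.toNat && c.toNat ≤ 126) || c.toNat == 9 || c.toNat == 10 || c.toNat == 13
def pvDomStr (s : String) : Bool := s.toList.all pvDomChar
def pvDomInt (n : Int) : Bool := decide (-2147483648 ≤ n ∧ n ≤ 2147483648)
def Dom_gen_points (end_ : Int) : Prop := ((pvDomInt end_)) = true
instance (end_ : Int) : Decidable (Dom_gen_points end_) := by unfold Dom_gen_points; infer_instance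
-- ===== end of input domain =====

-- B replaces A's full-range trial division by the variant that stops once the candidate squared exceeds num, and the
-- cycle/nested pair-of-legs spiral loop by one flat leg loop; equivalence of return values proved.
-- (The Python originals are generators; the ports return the list of yielded tuples. The while
-- loops are ported with a Nat fuel parameter that provably never runs out on the seeded values.)

-- ===== PORT A =====
-- for i in range(2, num): if num % i == 0: prime_status = 0; break
def prime_check_loop (num : Int) : List Int → Int → Int
  | [], st => st
  | i :: rest, st => if PySem.Int.mod num i == 0 then 0 else prime_check_loop num rest st

def prime_check (num : Int) : Int :=
  prime_check_loop num (PySem.List.pyRange 2 num 1) (if num == 1 then 0 else 1)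

-- moves = cycle([move_right, move_down, move_left, move_up]); mi counts next(_moves) calls
def applyMove (mi : Nat) (x y : Int) : Int × Int :=
  match mi % 4 with
  | 0 => (x + 1, y)
  | 1 => (x, y - 1)
  | 2 => (x - 1, y)
  | _ => (x, y + 1)

-- inner 'for _ in range(times_to_move)' loop; the Bool records that 'return' was hit
def innerA (end_ : Int) : Nat → Int → Int → Int → Nat → List (Int × Int × Int × Int) × Int × Int × Int × Bool
  | 0, n, x, y, _ => ([], n, x, y, false)
  | t + 1, n, x, y, mi =>
    if end_ ≤ n then ([], n, x, y, true)
    else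
      let p := applyMove mi x y
      let r := innerA end_ t (n + 1) p.1 p.2 mi
      ((prime_check (n + 1), p.1, p.2, n + 1) :: r.1, r.2)

-- the 'while True' loop; times_to_move = t + 1; fueled (n grows by ≥ 2 per iteration)
def outerA (end_ : Int) : Nat → Int → Int → Int → Nat → Nat → List (Int × Int × Int × Int)
  | 0, _, _, _, _, _ => []
  | f + 1, n, x, y, t, mi =>
    let r1 := innerA end_ (t + 1) n x y mi
    if r1.2.2.2.2 then r1.1
    else
      let r2 := innerA end_ (t + 1) r1.2.1 r1.2.2.1 r1.2.2.2.1 (mi + 1)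
      if r2.2.2.2.2 then r1.1 ++ r2.1
      else r1.1 ++ r2.1 ++ outerA end_ f r2.2.1 r2.2.2.1 r2.2.2.2.1 (t + 1) (mi + 2)

def gen_points (end_ : Int) : List (Int × Int × Int × Int) :=
  (prime_check 1, 0, 0, 1) :: outerA end_ ((end_ - 1).toNat + 1) 1 0 0 0 0

-- ===== PORT B =====
-- while i * i <= num: if num % i == 0: return 0; i += 1   (fueled; i ≤ num while looping)
def is_prime_loop (num : Int) : Nat → Int → Int
  | 0, _ => 1
  | f + 1, i =>
    if i * i ≤ num then
      if PySem.Int.mod num i == 0 then 0 else is_prime_loop num f (i + 1)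
    else 1

def is_prime_alt (num : Int) : Int :=
  if num < 2 then 0 else is_prime_loop num num.toNat 2

-- deltas = ((1,0),(0,-1),(-1,0),(0,1))
def deltasB : Nat → Int × Int
  | 0 => (1, 0)
  | 1 => (0, -1)
  | 2 => (-1, 0)
  | _ => (0, 1)

-- for _ in range(steps): step by (dx,dy) and yield
def legB : Nat → Int → Int → Int → Int → Int → List (Int × Int × Int × Int) × Int × Int × Int
  | 0, _, _, n, x, y => ([], n, x, y)
  | s + 1, dx, dy, n, x, y =>
    let r := legB s dx dy (n + 1) (x + dx) (y + dy)
    ((is_prime_alt (n + 1), x + dx, y + dy, n + 1) :: r.1, r.2)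

-- while n < end: one leg per iteration (fueled; n grows by ≥ 1 per iteration)
def spiralB (end_ : Int) : Nat → Int → Int → Int → Nat → List (Int × Int × Int × Int)
  | 0, _, _, _, _ => []
  | f + 1, n, x, y, leg =>
    if n < end_ then
      let steps0 : Int := (leg / 2 : Nat) + 1
      let steps : Int := if steps0 > end_ - n then end_ - n else steps0
      let r := legB steps.toNat (deltasB (leg % 4)).1 (deltasB (leg % 4)).2 n x y
      r.1 ++ spiralB end_ f r.2.1 r.2.2.1 r.2.2.2 (leg + 1)
    else []

def gen_points_alt (end_ : Int) : List (Int × Int × Int × Int) :=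
  (is_prime_alt 1, 0, 0, 1) :: spiralB end_ (end_ - 1).toNat 1 0 0 0

-- ===== PRECONDITION & SPEC =====
def Spec_gen_points (end_ : Int) (out : List (Int × Int × Int × Int)) : Prop := out = gen_points_alt end_
instance (end_ : Int) (out : List (Int × Int × Int × Int)) : Decidable (Spec_gen_points end_ out) := by unfold Spec_gen_points; infer_instance

-- ===== CLAIM (what is proved, stated in full; the proofs are below) =====
def Claim_equal_gen_points : Prop := ∀ (end_ : Int), Dom_gen_points end_ → Spec_gen_points end_ (gen_points end_)

-- ===== LEMMAS AND PROOFS =====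

theorem prime_check_loop_any (num : Int) (l : List Int) (st : Int) :
    prime_check_loop num l st = if l.any (fun i => PySem.Int.mod num i == 0) then 0 else st := by
  induction l with
  | nil => simp [prime_check_loop]
  | cons i rest ih => by_cases h : PySem.Int.mod num i == 0 <;> simp [prime_check_loop, h, ih]

theorem is_prime_loop_zero (num : Int) :
    ∀ (f : Nat) (i : Int), 2 ≤ i → (num - i).toNat < f →
      (∃ j : Int, i ≤ j ∧ j * j ≤ num ∧ PySem.Int.mod num j = 0) →
      is_prime_loop num f i = 0 := by
  intro f
  induction f with
  | zero => intro i _ hf _; omega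
  | succ f ih =>
    intro i hi2 hf ⟨j, hij, hjj, hj⟩
    have hj2 : 2 ≤ j := by omega
    have hjn : 2 * j ≤ num := by nlinarith
    by_cases hle : i * i ≤ num
    · rw [is_prime_loop, if_pos hle]
      by_cases hmod : PySem.Int.mod num i == 0
      · rw [if_pos hmod]
      · rw [if_neg hmod]
        rcases eq_or_lt_of_le hij with rfl | hlt
        · exact absurd hj (by simpa using hmod)
        · exact ih (i + 1) (by omega) (by omega) ⟨j, by omega, hjj, hj⟩
    · exfalso
      have : i * i ≤ j * j := by nlinarith
      omega
  
theorem is_prime_loop_one (num : Int) :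
    ∀ (f : Nat) (i : Int), 2 ≤ i →
      (∀ j : Int, i ≤ j → j * j ≤ num → PySem.Int.mod num j ≠ 0) →
      is_prime_loop num f i = 1 := by
  intro f
  induction f with
  | zero => intro i _ _; rfl
  | succ f ih =>
    intro i hi2 h
    by_cases hle : i * i ≤ num
    · have hmod : ¬ (PySem.Int.mod num i == 0) = true := by
        simpa using h i le_rfl hle
      rw [is_prime_loop, if_pos hle, if_neg hmod]
      exact ih (i + 1) (by omega) fun j hj hjj => h j (by omega) hjj
    · rw [is_prime_loop, if_neg hle]

-- a divisor in [2,num) exists iff one with j*j ≤ num exists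
theorem sqrt_divisor (num : Int) (h2 : 2 ≤ num) :
    (∃ i : Int, 2 ≤ i ∧ i < num ∧ PySem.Int.mod num i = 0) ↔
      (∃ j : Int, 2 ≤ j ∧ j * j ≤ num ∧ PySem.Int.mod num j = 0) := by
  constructor
  · rintro ⟨i, hi2, hin, hmod⟩
    have hdvd : i ∣ num := (PySem.Int.mod_eq_zero_iff_dvd num i).mp hmod
    rcases hdvd with ⟨k, hk⟩
    have hk2 : 2 ≤ k := by nlinarith
    by_cases hik : i ≤ k
    · exact ⟨i, hi2, by nlinarith, hmod⟩
    · exact ⟨k, hk2, by nlinarith, (PySem.Int.mod_eq_zero_iff_dvd num k).mpr ⟨i, by linarith [hk]⟩⟩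
  · rintro ⟨j, hj2, hjj, hmod⟩
    exact ⟨j, hj2, by nlinarith, hmod⟩

theorem prime_eq (num : Int) (h : 2 ≤ num) : prime_check num = is_prime_alt num := by
  unfold prime_check is_prime_alt
  have hne : (num == 1) = false := by simp; omega
  have hlt : ¬ num < 2 := by omega
  rw [hne, if_neg hlt, prime_check_loop_any]
  by_cases hex : ∃ j : Int, 2 ≤ j ∧ j * j ≤ num ∧ PySem.Int.mod num j = 0
  · rw [is_prime_loop_zero num num.toNat 2 le_rfl (by omega) hex]
    obtain ⟨i, hi2, hin, hmod⟩ := (sqrt_divisor num h).mpr hex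
    have hany : (PySem.List.pyRange 2 num 1).any (fun i => PySem.Int.mod num i == 0) = true := by
      rw [List.any_eq_true]
      exact ⟨i, (PySem.List.mem_pyRange_one).mpr ⟨hi2, hin⟩, by simpa using hmod⟩
    rw [hany]; rfl
  · rw [is_prime_loop_one num num.toNat 2 le_rfl (fun j hj hjj hm => hex ⟨j, hj, hjj, hm⟩)]
    have hany : (PySem.List.pyRange 2 num 1).any (fun i => PySem.Int.mod num i == 0) = false := by
      rw [List.any_eq_false]
      intro i hi hmod
      rw [PySem.List.mem_pyRange_one] at hi
      exact hex ((sqrt_divisor num h).mp ⟨i, hi.1, hi.2, by simpa using hmod⟩)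
    rw [hany]; rfl

theorem applyMove_eq (mi : Nat) (x y : Int) :
    applyMove mi x y = (x + (deltasB (mi % 4)).1, y + (deltasB (mi % 4)).2) := by
  have h : mi % 4 = 0 ∨ mi % 4 = 1 ∨ mi % 4 = 2 ∨ mi % 4 = 3 := by omega
  rcases h with h | h | h | h <;> simp [applyMove, deltasB, h, sub_eq_add_neg]

theorem legB_n (s : Nat) : ∀ (dx dy n x y : Int), (legB s dx dy n x y).2.1 = n + s := by
  induction s with
  | zero => intro dx dy n x y; simp [legB]
  | succ s ih => intro dx dy n x y; simp only [legB]; rw [ih]; omega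

theorem inner_eq_leg (end_ : Int) (s : Nat) :
    ∀ (n x y : Int) (mi : Nat), 1 ≤ n → (1 ≤ s ∨ 0 ≤ end_ - n) →
      innerA end_ s n x y mi =
        (((legB (min s (end_ - n).toNat) (deltasB (mi % 4)).1 (deltasB (mi % 4)).2 n x y).1,
          (legB (min s (end_ - n).toNat) (deltasB (mi % 4)).1 (deltasB (mi % 4)).2 n x y).2.1,
          (legB (min s (end_ - n).toNat) (deltasB (mi % 4)).1 (deltasB (mi % 4)).2 n x y).2.2.1,
          (legB (min s (end_ - n).toNat) (deltasB (mi % 4)).1 (deltasB (mi % 4)).2 n x y).2.2.2,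
          decide (end_ - n < (s : Int)))) := by
  induction s with
  | zero =>
    intro n x y mi hn hs
    have h0 : 0 ≤ end_ - n := by rcases hs with h | h <;> omega
    simp only [innerA, Nat.zero_min, legB, Nat.cast_zero]
    have : decide (end_ - n < (0 : Int)) = false := by simp; omega
    rw [this]
  | succ s ih =>
    intro n x y mi hn hs
    by_cases hle : end_ ≤ n
    · have ht : min (s + 1) (end_ - n).toNat = 0 := by omega
      have hd : decide (end_ - n < ((s + 1 : Nat) : Int)) = true := by
        simp only [decide_eq_true_eq]; push_cast; omega
      simp only [innerA, if_pos hle, ht, legB, hd]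
    · have ihh := ih (n + 1) (applyMove mi x y).1 (applyMove mi x y).2 mi (by omega)
        (Or.inr (by omega))
      simp only [innerA, if_neg hle]
      rw [ihh, applyMove_eq]
      have hmin : min (s + 1) (end_ - n).toNat = min s (end_ - (n + 1)).toNat + 1 := by omega
      rw [hmin]
      simp only [legB]
      rw [prime_eq (n + 1) (by omega)]
      have hd : decide (end_ - (n + 1) < (s : Int)) =
          decide (end_ - n < ((s + 1 : Nat) : Int)) := by
        rw [decide_eq_decide]; push_cast; omega
      rw [hd]

theorem spiral_nil (end_ : Int) :
    ∀ (f : Nat) (n x y : Int) (leg : Nat), ¬ n < end_ → spiralB end_ f n x y leg = [] := by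
  intro f n x y leg h
  cases f with
  | zero => rfl
  | succ f => rw [spiralB, if_neg h]

theorem spiral_step (end_ : Int) (f : Nat) (n x y : Int) (leg : Nat) (hlt : n < end_) :
    spiralB end_ (f + 1) n x y leg =
      (legB (min (leg / 2 + 1) (end_ - n).toNat) (deltasB (leg % 4)).1 (deltasB (leg % 4)).2 n x y).1 ++
        spiralB end_ f
          ((legB (min (leg / 2 + 1) (end_ - n).toNat) (deltasB (leg % 4)).1 (deltasB (leg % 4)).2 n x y).2.1)
          ((legB (min (leg / 2 + 1) (end_ - n).toNat) (deltasB (leg % 4)).1 (deltasB (leg % 4)).2 n x y).2.2.1)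
          ((legB (min (leg / 2 + 1) (end_ - n).toNat) (deltasB (leg % 4)).1 (deltasB (leg % 4)).2 n x y).2.2.2)
          (leg + 1) := by
  rw [spiralB, if_pos hlt]
  have hsteps : ((if ((leg / 2 : Nat) : Int) + 1 > end_ - n then end_ - n
      else ((leg / 2 : Nat) : Int) + 1)).toNat = min (leg / 2 + 1) (end_ - n).toNat := by
    split <;> omega
  simp only [hsteps]

theorem outer_eq_spiral (end_ : Int) :
    ∀ (fo : Nat) (n x y : Int) (t : Nat) (fs : Nat),
      (end_ - n).toNat < fo → (end_ - n).toNat ≤ fs → 1 ≤ n →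
      outerA end_ fo n x y t (2 * t) = spiralB end_ fs n x y (2 * t) := by
  intro fo
  induction fo with
  | zero => intro n x y t fs hfo _ _; omega
  | succ fo ih =>
    intro n x y t fs hfo hfs hn
    by_cases hlt : n < end_
    · have e1 := inner_eq_leg end_ (t + 1) n x y (2 * t) hn (Or.inl (by omega))
      obtain ⟨fs, rfl⟩ : ∃ fs', fs = fs' + 1 := ⟨fs - 1, by omega⟩
      rw [outerA, spiral_step end_ fs n x y (2 * t) hlt]
      have h2t : 2 * t / 2 + 1 = t + 1 := by omega
      rw [h2t]
      simp only [e1]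
      set L := legB (min (t + 1) (end_ - n).toNat) (deltasB (2 * t % 4)).1
        (deltasB (2 * t % 4)).2 n x y with hL
      have hLn : L.2.1 = n + ((min (t + 1) (end_ - n).toNat : Nat) : Int) := by
        rw [hL, legB_n]
      by_cases hA : end_ - n < (t : Int) + 1
      · have hdt : decide (end_ - n < ((t + 1 : Nat) : Int)) = true := by
          rw [decide_eq_true_eq]; push_cast; omega
        rw [if_pos hdt]
        have hstop : ¬ (L.2.1 < end_) := by omega
        rw [spiral_nil end_ fs L.2.1 L.2.2.1 L.2.2.2 (2 * t + 1) hstop, List.append_nil]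
      · have hdf : ¬ (decide (end_ - n < ((t + 1 : Nat) : Int)) = true) := by
          simp only [decide_eq_true_eq]; push_cast; omega
        rw [if_neg hdf]
        have e2 := inner_eq_leg end_ (t + 1) L.2.1 L.2.2.1 L.2.2.2 (2 * t + 1)
          (by omega) (Or.inl (by omega))
        simp only [e2]
        set L2 := legB (min (t + 1) (end_ - L.2.1).toNat) (deltasB ((2 * t + 1) % 4)).1
          (deltasB ((2 * t + 1) % 4)).2 L.2.1 L.2.2.1 L.2.2.2 with hL2
        have hL2n : L2.2.1 = L.2.1 + ((min (t + 1) (end_ - L.2.1).toNat : Nat) : Int) := by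
          rw [hL2, legB_n]
        by_cases hB : L.2.1 < end_
        · obtain ⟨fs, rfl⟩ : ∃ fs', fs = fs' + 1 := ⟨fs - 1, by omega⟩
          rw [spiral_step end_ fs L.2.1 L.2.2.1 L.2.2.2 (2 * t + 1) hB]
          have h2t' : (2 * t + 1) / 2 + 1 = t + 1 := by omega
          rw [h2t', ← hL2]
          by_cases hC : end_ - L.2.1 < (t : Int) + 1
          · have hd2 : decide (end_ - L.2.1 < ((t + 1 : Nat) : Int)) = true := by
              rw [decide_eq_true_eq]; push_cast; omega
            rw [if_pos hd2]
            have hstop2 : ¬ (L2.2.1 < end_) := by omega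
            rw [spiral_nil end_ fs L2.2.1 L2.2.2.1 L2.2.2.2 (2 * t + 1 + 1) hstop2,
              List.append_nil]
          · have hd2f : ¬ (decide (end_ - L.2.1 < ((t + 1 : Nat) : Int)) = true) := by
              simp only [decide_eq_true_eq]; push_cast; omega
            rw [if_neg hd2f]
            have h22 : 2 * t + 2 = 2 * (t + 1) := by ring
            have hrec : outerA end_ fo L2.2.1 L2.2.2.1 L2.2.2.2 (t + 1) (2 * t + 2) =
                spiralB end_ fs L2.2.1 L2.2.2.1 L2.2.2.2 (2 * t + 2) := by
              rw [h22]
              exact ih L2.2.1 L2.2.2.1 L2.2.2.2 (t + 1) fs (by omega) (by omega) (by omega)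
            rw [hrec]
            simp
        · -- the first leg ended exactly at end_: both remainders are empty
          have hd2 : decide (end_ - L.2.1 < ((t + 1 : Nat) : Int)) = true := by
            rw [decide_eq_true_eq]; push_cast; omega
          rw [if_pos hd2]
          have hc2 : min (t + 1) (end_ - L.2.1).toNat = 0 := by omega
          rw [spiral_nil end_ fs L.2.1 L.2.2.1 L.2.2.2 (2 * t + 1) hB, List.append_nil, hL2]
          simp [hc2, legB]
    · -- n ≥ end_: both sides are []
      have e1 := inner_eq_leg end_ (t + 1) n x y (2 * t) hn (Or.inl (by omega))
      rw [outerA, spiral_nil end_ fs n x y (2 * t) hlt]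
      simp only [e1]
      have h0 : min (t + 1) (end_ - n).toNat = 0 := by omega
      have hdt : decide (end_ - n < ((t + 1 : Nat) : Int)) = true := by
        rw [decide_eq_true_eq]; push_cast; omega
      rw [if_pos hdt]
      simp [h0, legB]

-- ===== VERDICT (by name: the statement is the Claim_ definition above) =====
theorem gen_points_spec : Claim_equal_gen_points := by
  intro end_ _
  unfold Spec_gen_points gen_points gen_points_alt
  have h1 : prime_check 1 = is_prime_alt 1 := by decide
  rw [h1, outer_eq_spiral end_ ((end_ - 1).toNat + 1) 1 0 0 0 ((end_ - 1).toNat)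
    (by omega) (by omega) (by omega)]
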